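-- pv_equiv track=rewrite | github.com/copasi/basico | basico/model_info.py | _split_by_cn
-- ===== SOURCE A (Python) =====
-- def _ends_in_start_e_notation(text):
--     # go through the string from reverse and check if it ends <number>e|E<space>
--     num_chars = len(text)
--     i = num_chars - 1
--     found_e = False
--     had_numbers = False
--     while i >= 0:
--         cur_char = text[i]
--         if cur_char in 'eE':
--             if found_e:
--                 return False
--             found_e = True
--             i -= 1
--             continue
--
--         if not found_e and cur_char == ' ':
--             i -= 1
--             continue
--
--         if found_e and had_numbers and cur_char == ' ':
--             return True
--
--         if not cur_char.isdigit():  # not a number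
--             if cur_char == '.':
--                 i-=1
--                 continue
--             return False
--
--         had_numbers = True
--         i -= 1
--     return had_numbers and found_e
--
-- def _split_by_cn(expression):
--     result = []
--     current = ''
--     num_chars = len(expression)
--     pos = 0
--     while pos < num_chars:
--         has_more = pos + 4 < num_chars
--         cur_char = expression[pos]
--
--         if cur_char == '<' and has_more:
--
--             next_3 = expression[pos:pos+4]
--
--             if next_3.startswith('<CN='):
--                 if current:
--                     result.append(current)
--                     current = ''
--
--                 end = expression.find('>', pos)
--                 cn = expression[pos+1: end]
--                 result.append(cn)
--                 pos = end + 1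
--                 continue
--
--         if cur_char in '/*+-()^%<>!=&|':
--
--             if cur_char == '+' or cur_char == '-':
--                 if current and _ends_in_start_e_notation(current):
--                     current += cur_char
--                     pos += 1
--                     continue
--
--             if current:
--                 result.append(current)
--                 current = ''
--
--             if pos + 1 < num_chars and expression[pos + 1] == '=':
--                 cur_char += '='
--                 pos += 1
--
--             # fix an issue with || and &&
--             for c in ['|', '&']:
--                 if pos + 1 < num_chars and expression[pos + 1] == c and cur_char == c:
--                     cur_char += c
--                     pos += 1
--
--             result.append(cur_char)
--
--         elif cur_char != ' ':
--             current += cur_char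
--
--         pos += 1
--
--     if current:
--         result.append(current)
--
--     return result
-- ===== SOURCE B (Python) =====
-- def _split_by_cn(expression):
--     # One forward pass: the "ends in start of e-notation" test is maintained
--     # incrementally (e-count / bad-char / digit flags) instead of rescanning
--     # the accumulated token backwards at every +/-.
--     result = []
--     cur = []          # characters of the current token (never contains ' ')
--     ec = 0            # number of e/E in cur
--     bad = False       # cur contains a char that is not e/E, digit or '.'
--     dig = False       # cur contains a digit
--     n = len(expression)
--     pos = 0
--     while pos < n:
--         c = expression[pos]
--         if c == '<' and expression[pos:pos + 4] == '<CN=' and pos + 4 < n: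
--             if cur:
--                 result.append(''.join(cur))
--             cur = []
--             ec = 0
--             bad = False
--             dig = False
--             end = expression.find('>', pos)
--             result.append(expression[pos + 1:end])
--             pos = end + 1
--             continue
--         if c in '/*+-()^%<>!=&|':
--             if c in '+-' and ec == 1 and not bad and dig:
--                 # token currently looks like <digits/dots, one e/E>: keep the sign
--                 cur.append(c)
--                 bad = True
--                 pos += 1
--                 continue
--             if cur:
--                 result.append(''.join(cur))
--             cur = []
--             ec = 0
--             bad = False
--             dig = False
--             nxt = expression[pos + 1:pos + 2]
--             if nxt == '=':
--                 result.append(c + '=')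
--                 pos += 2
--             elif nxt == c and c in '|&':
--                 result.append(c + c)
--                 pos += 2
--             else:
--                 result.append(c)
--                 pos += 1
--             continue
--         if c != ' ':
--             cur.append(c)
--             if c in 'eE':
--                 ec += 1
--             elif c.isdigit():
--                 dig = True
--             elif c != '.':
--                 bad = True
--         pos += 1
--     if cur:
--         result.append(''.join(cur))
--     return result
-- ===== Notes on version B (the rewrite author's own statement) =====
-- stated objective: faster
-- what changed: A re-scans the whole accumulated token backwards (_ends_in_start_e_notation) at every sign character; B instead keeps three constant-time flags (e-count, bad-char, digit) updated as characters are appended, making the pass linear, and decides two-character operator tokens by a single lookahead instead of sequential token patching.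
import Mathlib
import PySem

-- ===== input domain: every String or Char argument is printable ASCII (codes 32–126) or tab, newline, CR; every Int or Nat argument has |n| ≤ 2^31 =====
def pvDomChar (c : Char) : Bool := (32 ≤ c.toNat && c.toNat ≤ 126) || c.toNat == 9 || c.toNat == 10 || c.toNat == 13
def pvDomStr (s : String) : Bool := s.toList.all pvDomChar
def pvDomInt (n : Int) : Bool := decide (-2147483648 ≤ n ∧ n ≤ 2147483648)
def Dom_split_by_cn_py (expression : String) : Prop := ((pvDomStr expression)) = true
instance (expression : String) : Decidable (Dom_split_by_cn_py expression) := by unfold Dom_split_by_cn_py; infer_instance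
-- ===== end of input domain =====

-- B replaces A's backward rescan of the accumulated token (the e-notation test) by
-- three incrementally maintained flags, turning the worst case from quadratic to linear.

-- ===== PORT A =====

-- the operator character set '/*+-()^%<>!=&|' (shared literal constant)
def pvOps : List Char := ['/', '*', '+', '-', '(', ')', '^', '%', '<', '>', '!', '=', '&', '|']
-- the characters of '<CN='
def pvCN : List Char := ['<', 'C', 'N', '=']

-- _ends_in_start_e_notation: the backward while-loop, as structural recursion over the
-- reversed character list (i runs len-1 … 0, so the loop reads text.reverse left to right).
-- Python's single-char str.isdigit agrees with Char.isDigit on the ASCII domain.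
def eNoteGo : List Char → Bool → Bool → Bool
  | [], found_e, had_numbers => had_numbers && found_e
  | c :: rest, found_e, had_numbers =>
    if c = 'e' ∨ c = 'E' then
      if found_e then false else eNoteGo rest true had_numbers
    else if found_e = false ∧ c = ' ' then eNoteGo rest found_e had_numbers
    else if found_e = true ∧ had_numbers = true ∧ c = ' ' then true
    else if ¬ c.isDigit then
      (if c = '.' then eNoteGo rest found_e had_numbers else false)
    else eNoteGo rest found_e true

def ends_in_start_e_notation (text : List Char) : Bool := eNoteGo text.reverse false false

-- the main while-loop of _split_by_cn; fuel only makes the recursion structural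
-- (each iteration strictly increases pos, so fuel = chars.length is never exhausted)
def loopA (chars : List Char) : Nat → Nat → List String → List Char → List String
  | 0, _, result, current => if current.isEmpty then result else result ++ [String.mk current]
  | fuel+1, pos, result, current =>
    if pos < chars.length then
      let c := chars.getD pos ' '
      -- `cur_char == '<' and has_more` with the inner startswith test; its fall-through
      -- rejoins the operator test below, exactly as the Python control flow does
      if c = '<' ∧ pos + 4 < chars.length ∧
          PySem.Chars.startswith (PySem.List.slice chars (some (pos:Int)) (some ((pos:Int)+4))) pvCN = true then
        let result1 := if current.isEmpty then result else result ++ [String.mk current]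
        let e := PySem.Chars.findFrom chars ['>'] (pos:Int) none
        if e = -1 then
          -- Python sets pos = 0 here and never terminates; no return value is claimed there
          result1
        else
          loopA chars fuel (e.toNat+1)
            (result1 ++ [String.mk (PySem.List.slice chars (some ((pos:Int)+1)) (some e))]) []
      else if c ∈ pvOps then
        if (c = '+' ∨ c = '-') ∧ current ≠ [] ∧ ends_in_start_e_notation current = true then
          loopA chars fuel (pos+1) result (current ++ [c])
        else
          let result1 := if current.isEmpty then result else result ++ [String.mk current]
          let tok1 : List Char := [c]
          -- `if pos + 1 < num_chars and expression[pos+1] == '=':`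
          let m1 := pos+1 < chars.length ∧ chars.getD (pos+1) ' ' = '='
          let tok2 := if m1 then tok1 ++ ['='] else tok1
          let pos2 := if m1 then pos+1 else pos
          -- `for c in ['|', '&']:` unrolled
          let mP := pos2+1 < chars.length ∧ chars.getD (pos2+1) ' ' = '|' ∧ tok2 = ['|']
          let tok3 := if mP then tok2 ++ ['|'] else tok2
          let pos3 := if mP then pos2+1 else pos2
          let mA := pos3+1 < chars.length ∧ chars.getD (pos3+1) ' ' = '&' ∧ tok3 = ['&']
          let tok4 := if mA then tok3 ++ ['&'] else tok3
          let pos4 := if mA then pos3+1 else pos3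
          loopA chars fuel (pos4+1) (result1 ++ [String.mk tok4]) []
      else if c ≠ ' ' then
        loopA chars fuel (pos+1) result (current ++ [c])
      else
        loopA chars fuel (pos+1) result current
    else
      if current.isEmpty then result else result ++ [String.mk current]

def split_by_cn_py (expression : String) : List String :=
  loopA expression.toList expression.toList.length 0 [] []

-- ===== PORT B =====

-- the single forward pass of Source B: cur plus the incrementally maintained flags
-- ec (number of e/E in cur), bad (a char that is not e/E/digit/'.'), dig (a digit);
-- same fuel device as above
def loopB (chars : List Char) : Nat → Nat → List String → List Char → Int → Bool → Bool → List String
  | 0, _, result, cur, _, _, _ => if cur.isEmpty then result else result ++ [String.mk cur]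
  | fuel+1, pos, result, cur, ec, bad, dig =>
    if pos < chars.length then
      let c := chars.getD pos ' '
      if c = '<' ∧ PySem.List.slice chars (some (pos:Int)) (some ((pos:Int)+4)) = pvCN ∧
          pos + 4 < chars.length then
        let result1 := if cur.isEmpty then result else result ++ [String.mk cur]
        let e := PySem.Chars.findFrom chars ['>'] (pos:Int) none
        if e = -1 then
          -- Python diverges here exactly where A does; no return value is claimed there
          result1
        else
          loopB chars fuel (e.toNat+1)
            (result1 ++ [String.mk (PySem.List.slice chars (some ((pos:Int)+1)) (some e))]) [] 0 false false
      else if c ∈ pvOps then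
        if (c = '+' ∨ c = '-') ∧ ec = 1 ∧ bad = false ∧ dig = true then
          loopB chars fuel (pos+1) result (cur ++ [c]) ec true dig
        else
          let result1 := if cur.isEmpty then result else result ++ [String.mk cur]
          let nxt := PySem.List.slice chars (some ((pos:Int)+1)) (some ((pos:Int)+2))
          if nxt = ['='] then
            loopB chars fuel (pos+2) (result1 ++ [String.mk [c, '=']]) [] 0 false false
          else if nxt = [c] ∧ (c = '|' ∨ c = '&') then
            loopB chars fuel (pos+2) (result1 ++ [String.mk [c, c]]) [] 0 false false
          else
            loopB chars fuel (pos+1) (result1 ++ [String.mk [c]]) [] 0 false false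
      else if c ≠ ' ' then
        let st : Int × Bool × Bool :=
          if c = 'e' ∨ c = 'E' then (ec+1, bad, dig)
          else if c.isDigit then (ec, bad, true)
          else if c ≠ '.' then (ec, true, dig)
          else (ec, bad, dig)
        loopB chars fuel (pos+1) result (cur ++ [c]) st.1 st.2.1 st.2.2
      else
        loopB chars fuel (pos+1) result cur ec bad dig
    else
      if cur.isEmpty then result else result ++ [String.mk cur]

def split_by_cn_py_alt (expression : String) : List String :=
  loopB expression.toList expression.toList.length 0 [] [] 0 false false

-- ===== PRECONDITION & SPEC =====
def Spec_split_by_cn_py (expression : String) (out : List String) : Prop := out = split_by_cn_py_alt expression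
instance (expression : String) (out : List String) : Decidable (Spec_split_by_cn_py expression out) := by unfold Spec_split_by_cn_py; infer_instance

-- ===== CLAIM (what is proved, stated in full; the proofs are below) =====
def Claim_equal_split_by_cn_py : Prop := ∀ (expression : String), Dom_split_by_cn_py expression → Spec_split_by_cn_py expression (split_by_cn_py expression)

-- ===== LEMMAS AND PROOFS =====

-- the three state functions that B maintains incrementally
def cntE (l : List Char) : Nat := l.countP (fun c => decide (c = 'e' ∨ c = 'E'))
def hasBad (l : List Char) : Bool := l.any (fun c => decide (¬ (c = 'e' ∨ c = 'E') ∧ ¬ c.isDigit = true ∧ c ≠ '.'))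
def hasDig (l : List Char) : Bool := l.any (fun c => c.isDigit)

-- characterisation of the backward scan on a space-free token
lemma eNoteGo_char (l : List Char) (h : ' ' ∉ l) (f had : Bool) :
    eNoteGo l f had =
      (decide (cntE l + (if f then 1 else 0) = 1) && !hasBad l && (had || hasDig l)) := by
  induction l generalizing f had with
  | nil => cases f <;> cases had <;> simp [eNoteGo, cntE, hasBad, hasDig]
  | cons c rest ih =>
    have hc : c ≠ ' ' := by intro hc; exact h (hc ▸ List.mem_cons_self)
    have h' : ' ' ∉ rest := fun hm => h (List.mem_cons_of_mem _ hm)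
    by_cases he : c = 'e' ∨ c = 'E'
    · rcases he with he | he <;> subst he <;>
      cases f with
      | true => simp [eNoteGo, cntE, List.countP_cons, hasBad, hasDig]
      | false =>
        rw [show eNoteGo (_ :: rest) false had = eNoteGo rest true had from by
              simp [eNoteGo], ih h' true had]
        simp [cntE, hasBad, hasDig]
    · by_cases hd : c.isDigit
      · rw [show eNoteGo (c :: rest) f had = eNoteGo rest f true by
          simp [eNoteGo, he, hc, hd]]
        rw [ih h' f true]
        simp [cntE, hasBad, hasDig, he, hd]
      · by_cases hdot : c = '.'
        · rw [show eNoteGo (c :: rest) f had = eNoteGo rest f had by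
            simp [eNoteGo, he, hc, hd, hdot]]
          rw [ih h' f had]
          simp [cntE, hasBad, hasDig, he, hd, hdot]
        · rw [show eNoteGo (c :: rest) f had = false by
            simp [eNoteGo, he, hc, hd, hdot]]
          simp [hasBad, List.any_cons, he, hd, hdot]

lemma ends_char (l : List Char) (h : ' ' ∉ l) :
    ends_in_start_e_notation l = (decide (cntE l = 1) && !hasBad l && hasDig l) := by
  unfold ends_in_start_e_notation
  rw [eNoteGo_char _ (by simpa using h) false false]
  simp [cntE, hasBad, hasDig]

-- the slices both loops take, in drop/take form
lemma slice_take4 (xs : List Char) (p : Nat) :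
    PySem.List.slice xs (some (p:Int)) (some ((p:Int)+4)) = (xs.drop p).take 4 := by
  rw [show ((p:Int)+4) = (((p+4:Nat)):Int) by push_cast; ring, PySem.List.slice_natCast]
  congr 1
  omega

lemma slice_take1 (xs : List Char) (p : Nat) :
    PySem.List.slice xs (some ((p:Int)+1)) (some ((p:Int)+2)) = (xs.drop (p+1)).take 1 := by
  rw [show ((p:Int)+1) = (((p+1:Nat)):Int) by push_cast; ring,
      show ((p:Int)+2) = (((p+2:Nat)):Int) by push_cast; ring, PySem.List.slice_natCast]
  congr 1
  omega

lemma drop_take_one (l : List Char) (i : Nat) (h : i < l.length) :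
    (l.drop i).take 1 = [l.getD i ' '] := by
  conv_lhs => rw [List.drop_eq_getElem_cons h]
  rw [List.take_succ_cons, List.take_zero, List.getD_eq_getElem?_getD, List.getElem?_eq_getElem h]
  rfl

lemma drop_take_one_nil (l : List Char) (i : Nat) (h : ¬ i < l.length) :
    (l.drop i).take 1 = [] := by
  rw [List.drop_eq_nil_of_le (by omega)]
  rfl

-- A's startswith test on the four-character slice is B's equality test
lemma startswith_slice_iff (xs : List Char) (p : Nat) (h4 : p + 4 < xs.length) :
    PySem.Chars.startswith ((xs.drop p).take 4) pvCN = true ↔ (xs.drop p).take 4 = pvCN := by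
  rw [PySem.Chars.startswith_iff]
  constructor
  · intro hp
    have hl : ((xs.drop p).take 4).length = 4 := by
      simp
      omega
    exact (hp.eq_of_length (by simp [hl, pvCN])).symm
  · intro hp
    rw [hp]

lemma cntE_ne_nil {l : List Char} (h : cntE l = 1) : l ≠ [] := by
  intro hnil
  rw [hnil] at h
  simp [cntE] at h

lemma not_mem_append_singleton {cur : List Char} (h : ' ' ∉ cur) {c : Char} (hc : c ≠ ' ') :
    ' ' ∉ cur ++ [c] := by
  intro hm
  rcases List.mem_append.mp hm with h1 | h1
  · exact h h1
  · simp at h1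
    exact hc h1.symm

-- the two loops agree step for step
lemma loopAB_eq (chars : List Char) :
    ∀ fuel pos result cur, ' ' ∉ cur →
      loopA chars fuel pos result cur =
        loopB chars fuel pos result cur (cntE cur : Int) (hasBad cur) (hasDig cur) := by
  intro fuel
  induction fuel with
  | zero => intro pos result cur _; rfl
  | succ n ih =>
    intro pos result cur hsp
    by_cases hlt : pos < chars.length
    case neg => simp only [loopA, loopB, if_neg hlt]
    case pos =>
    have hslice := slice_take4 chars pos
    by_cases hcn : chars.getD pos ' ' = '<' ∧
        PySem.List.slice chars (some (pos:Int)) (some ((pos:Int)+4)) = pvCN ∧ pos + 4 < chars.length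
    · -- both take the CN branch
      have hcnA : chars.getD pos ' ' = '<' ∧ pos + 4 < chars.length ∧
          PySem.Chars.startswith (PySem.List.slice chars (some (pos:Int)) (some ((pos:Int)+4))) pvCN = true :=
        ⟨hcn.1, hcn.2.2, by rw [hslice]; exact (startswith_slice_iff chars pos hcn.2.2).mpr (hslice ▸ hcn.2.1)⟩
      simp only [loopA, loopB, if_pos hlt, if_pos hcnA, if_pos hcn]
      by_cases he : PySem.Chars.findFrom chars ['>'] (pos:Int) none = -1
      · rw [if_pos he, if_pos he]
      · rw [if_neg he, if_neg he]
        simpa [cntE, hasBad, hasDig] using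
          ih _ (_ ++ [String.mk (PySem.List.slice chars (some ((pos:Int)+1)) (some (PySem.Chars.findFrom chars ['>'] (pos:Int) none)))]) [] (by simp)
    · -- neither takes the CN branch
      have hcnA' : ¬ (chars.getD pos ' ' = '<' ∧ pos + 4 < chars.length ∧
          PySem.Chars.startswith (PySem.List.slice chars (some (pos:Int)) (some ((pos:Int)+4))) pvCN = true) := by
        rintro ⟨h1, h2, h3⟩
        rw [hslice] at h3
        exact hcn ⟨h1, hslice ▸ (startswith_slice_iff chars pos h2).mp h3, h2⟩
      simp only [loopA, loopB, if_pos hlt, if_neg hcnA', if_neg hcn]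
      by_cases hop : chars.getD pos ' ' ∈ pvOps
      · rw [if_pos hop, if_pos hop]
        -- the e-notation-continuation conditions of A and B are equivalent
        have hiff : (cur ≠ [] ∧ ends_in_start_e_notation cur = true) ↔
            ((cntE cur : Int) = 1 ∧ hasBad cur = false ∧ hasDig cur = true) := by
          rw [ends_char cur hsp]
          constructor
          · rintro ⟨-, hE⟩
            simp only [Bool.and_eq_true, decide_eq_true_eq, Bool.not_eq_eq_eq_not, Bool.not_true] at hE
            exact ⟨by exact_mod_cast hE.1.1, hE.1.2, hE.2⟩
          · rintro ⟨h1, h2, h3⟩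
            have h1' : cntE cur = 1 := by exact_mod_cast h1
            exact ⟨cntE_ne_nil h1', by simp [h1', h2, h3]⟩
        by_cases hec : (chars.getD pos ' ' = '+' ∨ chars.getD pos ' ' = '-') ∧
            (cntE cur : Int) = 1 ∧ hasBad cur = false ∧ hasDig cur = true
        · rw [if_pos ⟨hec.1, hiff.mpr hec.2⟩, if_pos hec]
          have hne : chars.getD pos ' ' ≠ ' ' := by
            rcases hec.1 with h | h <;> rw [h] <;> decide
          rw [ih (pos+1) result (cur ++ [chars.getD pos ' ']) (not_mem_append_singleton hsp hne)]
          have hpm' := hec.1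
          simp only [List.getD_eq_getElem?_getD] at hpm'
          rcases hpm' with h | h <;>
            simp [cntE, hasBad, hasDig, List.countP_append, List.any_append, h]
        · rw [if_neg (fun hA => hec ⟨hA.1, hiff.mp hA.2⟩), if_neg hec]
          -- the operator-token branch
          have hstep : ∀ (P : Nat) (R : List String),
              loopA chars n P R [] = loopB chars n P R [] 0 false false := by
            intro P R
            simpa [cntE, hasBad, hasDig] using ih P R [] (by simp)
          by_cases hp1 : pos + 1 < chars.length
          · rw [show PySem.List.slice chars (some ((pos:Int)+1)) (some ((pos:Int)+2)) =
                  [chars.getD (pos+1) ' '] from (slice_take1 chars pos).trans (drop_take_one _ _ hp1)]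
            by_cases hd : chars.getD (pos+1) ' ' = '='
            · -- '=' merge: A builds [c,'='] and skips one char; B reads the pair directly
              simp only [if_pos (show pos + 1 < chars.length ∧ chars.getD (pos+1) ' ' = '='
                  from ⟨hp1, hd⟩),
                if_neg (show ¬ (pos + 1 + 1 < chars.length ∧ chars.getD (pos+1+1) ' ' = '|' ∧
                    ([chars.getD pos ' '] ++ ['='] : List Char) = ['|']) from by
                  rintro ⟨-, -, h⟩; simp at h),
                if_neg (show ¬ (pos + 1 + 1 < chars.length ∧ chars.getD (pos+1+1) ' ' = '&' ∧
                    ([chars.getD pos ' '] ++ ['='] : List Char) = ['&']) from by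
                  rintro ⟨-, -, h⟩; simp at h),
                if_pos (show ([chars.getD (pos+1) ' '] : List Char) = ['='] from by rw [hd])]
              exact hstep _ _
            · have hm1 : ¬ (pos + 1 < chars.length ∧ chars.getD (pos+1) ' ' = '=') :=
                fun h => hd h.2
              simp only [if_neg hm1]
              by_cases hdc : chars.getD (pos+1) ' ' = chars.getD pos ' ' ∧
                  (chars.getD pos ' ' = '|' ∨ chars.getD pos ' ' = '&')
              · -- '||' / '&&' merge
                obtain ⟨hdc1, hdc2⟩ := hdc
                rcases hdc2 with hdc2 | hdc2 <;> rw [hdc2] at hdc1 ⊢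
                · simp only [eq_self_iff_true, and_true, true_and, true_or, or_true,
                    if_pos (show pos + 1 < chars.length ∧ chars.getD (pos+1) ' ' = '|'
                      from ⟨hp1, hdc1⟩),
                    if_neg (show ¬ (pos + 1 + 1 < chars.length ∧ chars.getD (pos+1+1) ' ' = '&' ∧
                        (['|'] ++ ['|'] : List Char) = ['&']) from by rintro ⟨-, -, h⟩; simp at h),
                    if_neg (show ¬ (([chars.getD (pos+1) ' '] : List Char) = ['=']) from by
                      rw [hdc1]; simp),
                    if_pos (show ([chars.getD (pos+1) ' '] : List Char) = ['|'] from by rw [hdc1])]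
                  exact hstep _ _
                · simp only [eq_self_iff_true, and_true, true_and, true_or, or_true, false_or,
                    if_neg (show ¬ (pos + 1 < chars.length ∧ chars.getD (pos+1) ' ' = '|' ∧
                        (['&'] : List Char) = ['|']) from by rintro ⟨-, -, h⟩; simp at h),
                    if_pos (show pos + 1 < chars.length ∧ chars.getD (pos+1) ' ' = '&'
                      from ⟨hp1, hdc1⟩),
                    if_neg (show ¬ (([chars.getD (pos+1) ' '] : List Char) = ['=']) from by
                      rw [hdc1]; simp),
                    if_pos (show ([chars.getD (pos+1) ' '] : List Char) = ['&'] from by rw [hdc1])]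
                  exact hstep _ _
              · -- single-character operator token
                simp only [
                  if_neg (show ¬ (pos + 1 < chars.length ∧ chars.getD (pos+1) ' ' = '|' ∧
                      ([chars.getD pos ' '] : List Char) = ['|']) from by
                    rintro ⟨-, h1, h2⟩; simp at h2; exact hdc ⟨h1.trans h2.symm, Or.inl h2⟩),
                  if_neg (show ¬ (pos + 1 < chars.length ∧ chars.getD (pos+1) ' ' = '&' ∧
                      ([chars.getD pos ' '] : List Char) = ['&']) from by
                    rintro ⟨-, h1, h2⟩; simp at h2; exact hdc ⟨h1.trans h2.symm, Or.inr h2⟩),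
                  if_neg (show ¬ (([chars.getD (pos+1) ' '] : List Char) = ['=']) from by
                    intro h; simp at h; exact hd h),
                  if_neg (show ¬ (([chars.getD (pos+1) ' '] : List Char) = [chars.getD pos ' '] ∧
                      (chars.getD pos ' ' = '|' ∨ chars.getD pos ' ' = '&')) from by
                    rintro ⟨h1, h2⟩; simp at h1; exact hdc ⟨h1, h2⟩)]
                exact hstep _ _
          · rw [show PySem.List.slice chars (some ((pos:Int)+1)) (some ((pos:Int)+2)) =
                  ([] : List Char) from (slice_take1 chars pos).trans (drop_take_one_nil _ _ hp1)]
            simp only [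
              if_neg (show ¬ (pos + 1 < chars.length ∧ chars.getD (pos+1) ' ' = '=') from
                fun h => hp1 h.1),
              if_neg (show ¬ (pos + 1 < chars.length ∧ chars.getD (pos+1) ' ' = '|' ∧
                  ([chars.getD pos ' '] : List Char) = ['|']) from fun h => hp1 h.1),
              if_neg (show ¬ (pos + 1 < chars.length ∧ chars.getD (pos+1) ' ' = '&' ∧
                  ([chars.getD pos ' '] : List Char) = ['&']) from fun h => hp1 h.1),
              if_neg (show ¬ (([] : List Char) = ['=']) from by simp),
              if_neg (show ¬ (([] : List Char) = [chars.getD pos ' '] ∧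
                  (chars.getD pos ' ' = '|' ∨ chars.getD pos ' ' = '&')) from by
                rintro ⟨h1, -⟩; simp at h1)]
            exact hstep _ _
      · rw [if_neg hop, if_neg hop]
        by_cases hspc : chars.getD pos ' ' = ' '
        · rw [if_neg (fun hne => hne hspc), if_neg (fun hne => hne hspc)]
          exact ih _ _ _ hsp
        · rw [if_pos hspc, if_pos hspc]
          by_cases hce : chars.getD pos ' ' = 'e' ∨ chars.getD pos ' ' = 'E'
          · rcases hce with h | h <;>
              rw [h, ih (pos+1) result (cur ++ [_]) (not_mem_append_singleton hsp (by decide))] <;>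
              simp [cntE, hasBad, hasDig, List.countP_append, List.any_append]
          · have hce' := hce
            simp only [List.getD_eq_getElem?_getD] at hce'
            by_cases hdg : (chars.getD pos ' ').isDigit
            · rw [ih (pos+1) result (cur ++ [chars.getD pos ' ']) (not_mem_append_singleton hsp hspc)]
              have hdg' := hdg
              simp only [List.getD_eq_getElem?_getD] at hdg'
              simp [cntE, hasBad, hasDig, List.countP_append, List.any_append, hce', hdg']
            · have hdg' := hdg
              simp only [List.getD_eq_getElem?_getD] at hdg'
              by_cases hdot : chars.getD pos ' ' = '.'
              · rw [ih (pos+1) result (cur ++ [chars.getD pos ' ']) (not_mem_append_singleton hsp hspc)]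
                have hdot' := hdot
                simp only [List.getD_eq_getElem?_getD] at hdot'
                simp [cntE, hasBad, hasDig, List.countP_append, List.any_append, hce', hdg', hdot']
              · rw [ih (pos+1) result (cur ++ [chars.getD pos ' ']) (not_mem_append_singleton hsp hspc)]
                have hdot' := hdot
                simp only [List.getD_eq_getElem?_getD] at hdot'
                have h1 : (decide (chars[pos]?.getD ' ' = 'e')) = false :=
                  decide_eq_false (fun h => hce' (Or.inl h))
                have h2 : (decide (chars[pos]?.getD ' ' = 'E')) = false :=
                  decide_eq_false (fun h => hce' (Or.inr h))
                simp [cntE, hasBad, hasDig, List.countP_append, List.any_append, hce', hdg',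
                  hdot', h1, h2]

-- ===== VERDICT (by name: the statement is the Claim_ definition above) =====
theorem split_by_cn_py_spec : Claim_equal_split_by_cn_py := by
  intro expression _
  unfold Spec_split_by_cn_py split_by_cn_py split_by_cn_py_alt
  simpa [cntE, hasBad, hasDig] using
    loopAB_eq expression.toList expression.toList.length 0 [] [] (by simp)
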